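-- pv_equiv track=rewrite | github.com/hi1d/algorithm | 20220407.py | solution
-- ===== SOURCE A (Python) =====
-- def solution(arr):
--     if len(arr) == 1:
--         return arr
--     arr = arr[::-1]
--     if len(arr) % 2:
--         front = solution(arr[:len(arr)//2+1])
--         back = solution(arr[len(arr)//2+1:])
--     else:
--         front = solution(arr[:len(arr)//2])
--         back = solution(arr[len(arr)//2:])
--
--     return front + back
-- ===== SOURCE B (Python) =====
-- def solution(arr):
--     out = []
--     stack = [arr]
--     while stack:
--         seg = stack.pop()
--         if len(seg) == 1:
--             out.append(seg[0])
--         else: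
--             seg = seg[::-1]
--             k = len(seg) // 2 + len(seg) % 2
--             stack.append(seg[k:])
--             stack.append(seg[:k])
--     return out
-- ===== Notes on version B (the rewrite author's own statement) =====
-- stated objective: alternative
-- what changed: Replaces A's recursion (reverse, split, recurse on both halves, concatenate) by an iterative loop over an explicit stack of sub-segments that appends singletons to an output accumulator, so no call stack and no intermediate list concatenations.
-- outside the precondition, e.g. on solution([]): A raises RecursionError, B does not finish within the time limit
import Mathlib
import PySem

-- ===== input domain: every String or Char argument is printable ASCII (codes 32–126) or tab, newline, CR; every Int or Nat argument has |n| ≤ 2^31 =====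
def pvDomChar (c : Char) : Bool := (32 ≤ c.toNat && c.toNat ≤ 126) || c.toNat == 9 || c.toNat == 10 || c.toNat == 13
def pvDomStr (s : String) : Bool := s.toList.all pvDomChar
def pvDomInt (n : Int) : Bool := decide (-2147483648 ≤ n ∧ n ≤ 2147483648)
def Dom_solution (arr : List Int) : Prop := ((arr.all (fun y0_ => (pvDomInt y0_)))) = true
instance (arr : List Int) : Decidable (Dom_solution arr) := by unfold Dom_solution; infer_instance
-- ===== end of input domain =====

-- B replaces A's recursion (reverse, split, recurse, concatenate) by an iterative loop over an
-- explicit stack of sub-segments appending singletons to an output accumulator (objective: alternative).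

-- ===== PORT A =====
-- Slices arr[::-1], arr[:k], arr[k:] with 0 ≤ k ≤ len are exactly reverse/take/drop.
-- The fuel argument (arr.length, one unit per recursion level, sufficient since each level
-- strictly shortens the list) and the '≤ 1' test (Python tests '== 1') only make the Python
-- recursion total in Lean: they change nothing on Pre_ (arr ≠ []); on [] Python A recurses
-- forever (RecursionError) and [] is excluded by Pre_solution.
def solutionGo : Nat → List Int → List Int
  | 0, arr => arr
  | fuel + 1, arr =>
    if arr.length ≤ 1 then arr
    else
      if arr.reverse.length % 2 ≠ 0 then
        solutionGo fuel (arr.reverse.take (arr.reverse.length / 2 + 1)) ++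
          solutionGo fuel (arr.reverse.drop (arr.reverse.length / 2 + 1))
      else
        solutionGo fuel (arr.reverse.take (arr.reverse.length / 2)) ++
          solutionGo fuel (arr.reverse.drop (arr.reverse.length / 2))

def solution (arr : List Int) : List Int := solutionGo arr.length arr

-- ===== PORT B =====
-- Loop fuel: an empty segment counts 1, a segment of length n ≥ 1 counts 2n-1; every iteration
-- of Source B's while loop decreases this sum by at least 1, so it bounds the number of iterations.
def altMeasure (stack : List (List Int)) : Nat :=
  (stack.map (fun s => if s.length = 0 then 1 else 2 * s.length - 1)).sum

-- Port of Source B's while loop; 'out.append(seg[0])' for a singleton seg is 'out ++ seg'.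
-- The fuel and the empty-segment skip branch only make the loop total in Lean: Python B loops
-- forever on an empty segment, which is reachable only from the input [], excluded by Pre_solution.
def altLoopGo : Nat → List (List Int) → List Int → List Int
  | 0, _, out => out
  | fuel + 1, stack, out =>
    match stack with
    | [] => out
    | seg :: rest =>
      if seg.length = 1 then altLoopGo fuel rest (out ++ seg)
      else if seg.length = 0 then altLoopGo fuel rest out
      else
        altLoopGo fuel
          (seg.reverse.take (seg.reverse.length / 2 + seg.reverse.length % 2) ::
           seg.reverse.drop (seg.reverse.length / 2 + seg.reverse.length % 2) :: rest) out

def solution_alt (arr : List Int) : List Int := altLoopGo (altMeasure [arr]) [arr] []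

-- ===== PRECONDITION & SPEC =====
-- Pre_ excludes only []: there Python A raises RecursionError and Python B loops forever.
def Pre_solution (arr : List Int) : Prop := arr ≠ []
instance (arr : List Int) : Decidable (Pre_solution arr) := by unfold Pre_solution; infer_instance
def pvWitness_solution : List Int := ([1, 2, 3, 4, 5])

def Spec_solution (arr : List Int) (out : List Int) : Prop := out = solution_alt arr
instance (arr : List Int) (out : List Int) : Decidable (Spec_solution arr out) := by unfold Spec_solution; infer_instance

-- ===== CLAIM (what is proved, stated in full; the proofs are below) =====
def Claim_equal_solution : Prop := ∀ (arr : List Int), Dom_solution arr → Pre_solution arr → Spec_solution arr (solution arr)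

-- ===== LEMMAS AND PROOFS =====

-- Any fuel ≥ arr.length computes the same value as fuel = arr.length.
theorem solutionGo_congr : ∀ (f1 f2 : Nat) (arr : List Int),
    arr.length ≤ f1 → arr.length ≤ f2 → solutionGo f1 arr = solutionGo f2 arr := by
  intro f1
  induction f1 with
  | zero =>
    intro f2 arr h1 _
    have : arr = [] := by cases arr <;> simp_all
    subst this
    cases f2 <;> simp [solutionGo]
  | succ f1 ih =>
    intro f2 arr h1 h2
    cases f2 with
    | zero =>
      have : arr = [] := by cases arr <;> simp_all
      subst this
      simp [solutionGo]
    | succ f2 =>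
      rw [solutionGo, solutionGo]
      by_cases hle : arr.length ≤ 1
      · rw [if_pos hle, if_pos hle]
      · simp only [hle, if_false]
        have hr : arr.reverse.length = arr.length := by simp
        have h2le : 2 ≤ arr.length := by omega
        by_cases hodd : arr.reverse.length % 2 ≠ 0
        · rw [if_pos hodd, if_pos hodd]
          have hta : (arr.reverse.take (arr.reverse.length / 2 + 1)).length ≤ arr.length - 1 := by
            simp only [List.length_take]; omega
          have hda : (arr.reverse.drop (arr.reverse.length / 2 + 1)).length ≤ arr.length - 1 := by
            simp only [List.length_drop]; omega
          rw [ih f2 _ (by omega) (by omega), ih f2 _ (by omega) (by omega)]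
        · rw [if_neg hodd, if_neg hodd]
          have hta : (arr.reverse.take (arr.reverse.length / 2)).length ≤ arr.length - 1 := by
            simp only [List.length_take]; omega
          have hda : (arr.reverse.drop (arr.reverse.length / 2)).length ≤ arr.length - 1 := by
            simp only [List.length_drop]; omega
          rw [ih f2 _ (by omega) (by omega), ih f2 _ (by omega) (by omega)]

theorem altMeasure_cons (seg : List Int) (rest : List (List Int)) :
    altMeasure (seg :: rest) =
      (if seg.length = 0 then 1 else 2 * seg.length - 1) + altMeasure rest := by
  simp [altMeasure]

-- Any fuel ≥ altMeasure stack computes the same value.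
theorem altLoopGo_congr : ∀ (f1 f2 : Nat) (stack : List (List Int)) (out : List Int),
    altMeasure stack ≤ f1 → altMeasure stack ≤ f2 → altLoopGo f1 stack out = altLoopGo f2 stack out := by
  intro f1
  induction f1 with
  | zero =>
    intro f2 stack out h1 _
    cases stack with
    | nil => cases f2 <;> simp [altLoopGo]
    | cons seg rest =>
      exfalso
      rw [altMeasure_cons] at h1
      split_ifs at h1 <;> omega
  | succ f1 ih =>
    intro f2 stack out h1 h2
    cases stack with
    | nil => cases f2 <;> simp [altLoopGo]
    | cons seg rest =>
      cases f2 with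
      | zero =>
        exfalso
        rw [altMeasure_cons] at h2
        split_ifs at h2 <;> omega
      | succ f2 =>
        rw [altMeasure_cons] at h1 h2
        rw [altLoopGo, altLoopGo]
        by_cases hs1 : seg.length = 1
        · have hm : altMeasure rest ≤ f1 ∧ altMeasure rest ≤ f2 := by
            constructor <;> (split_ifs at h1 h2 <;> omega)
          simp only [hs1, if_true]
          exact ih f2 rest (out ++ seg) hm.1 hm.2
        · simp only [hs1, if_false]
          by_cases hs0 : seg.length = 0
          · have hm : altMeasure rest ≤ f1 ∧ altMeasure rest ≤ f2 := by
              constructor <;> (split_ifs at h1 h2 ; omega)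
            simp only [hs0, if_true]
            exact ih f2 rest out hm.1 hm.2
          · simp only [hs0, if_false]
            have hr : seg.reverse.length = seg.length := by simp
            have h2le : 2 ≤ seg.length := by omega
            set k := seg.reverse.length / 2 + seg.reverse.length % 2 with hk
            have hk1 : 1 ≤ k := by omega
            have hkn : k < seg.reverse.length := by omega
            have hmnew : altMeasure (seg.reverse.take k :: seg.reverse.drop k :: rest) + 1 ≤
                (if seg.length = 0 then 1 else 2 * seg.length - 1) + altMeasure rest := by
              rw [altMeasure_cons, altMeasure_cons]
              simp only [List.length_take, List.length_drop]
              split_ifs <;> omega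
            apply ih
            · split_ifs at h1 hmnew ; omega
            · split_ifs at h2 hmnew ; omega

-- One loop step on a nonempty segment appends exactly A's result for that segment.
theorem altLoop_step (n : Nat) : ∀ (seg : List Int), seg.length = n → seg ≠ [] →
    ∀ (stack : List (List Int)) (out : List Int) (f : Nat), altMeasure (seg :: stack) ≤ f →
      altLoopGo f (seg :: stack) out =
        altLoopGo (altMeasure stack) stack (out ++ solutionGo seg.length seg) := by
  induction n using Nat.strong_induction_on with
  | _ n ih =>
    intro seg hlen hne stack out f hf
    have hpos : 0 < seg.length := List.length_pos_iff.mpr hne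
    rw [altMeasure_cons] at hf
    have hseg0 : ¬ seg.length = 0 := by omega
    simp only [hseg0, if_false] at hf
    obtain ⟨f', rfl⟩ : ∃ f', f = f' + 1 := ⟨f - 1, by omega⟩
    by_cases h1 : seg.length = 1
    · rw [altLoopGo]
      simp only [h1, if_true]
      rw [show solutionGo 1 seg = seg from by rw [solutionGo, if_pos (by omega : seg.length ≤ 1)]]
      exact altLoopGo_congr f' (altMeasure stack) stack (out ++ seg) (by omega) le_rfl
    · have h2 : 2 ≤ seg.length := by omega
      rw [altLoopGo]
      simp only [h1, if_false, hseg0, if_false]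
      have hr : seg.reverse.length = seg.length := by simp
      set k := seg.reverse.length / 2 + seg.reverse.length % 2 with hk
      have hk1 : 1 ≤ k := by omega
      have hkn : k < seg.reverse.length := by omega
      have htl : (seg.reverse.take k).length = k := by simp only [List.length_take]; omega
      have hdl : (seg.reverse.drop k).length = seg.length - k := by
        simp only [List.length_drop]; omega
      have hfne : seg.reverse.take k ≠ [] := by
        intro h; rw [h] at htl; simp at htl; omega
      have hbne : seg.reverse.drop k ≠ [] := by
        intro h; rw [h] at hdl; simp at hdl; omega
      have hmf : altMeasure (seg.reverse.take k :: seg.reverse.drop k :: stack) ≤ f' := by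
        rw [altMeasure_cons, altMeasure_cons, htl, hdl]
        split_ifs <;> omega
      rw [ih (seg.reverse.take k).length (by omega) _ rfl hfne (seg.reverse.drop k :: stack) out f' hmf]
      rw [ih (seg.reverse.drop k).length (by omega) _ rfl hbne stack _ _ le_rfl]
      rw [List.append_assoc]
      congr 1
      -- the two collected results form exactly A's recursion on seg
      obtain ⟨m, hm⟩ : ∃ m, seg.length = m + 1 := ⟨seg.length - 1, by omega⟩
      rw [hm, solutionGo]
      have hnle : ¬ seg.length ≤ 1 := by omega
      rw [if_neg hnle]
      by_cases hodd : seg.reverse.length % 2 ≠ 0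
      · have hkeq : seg.reverse.length / 2 + 1 = k := by omega
        rw [if_pos hodd, hkeq]
        rw [solutionGo_congr (seg.reverse.take k).length m _ le_rfl (by omega),
            solutionGo_congr (seg.reverse.drop k).length m _ le_rfl (by omega)]
      · have hkeq : seg.reverse.length / 2 = k := by omega
        rw [if_neg hodd, hkeq]
        rw [solutionGo_congr (seg.reverse.take k).length m _ le_rfl (by omega),
            solutionGo_congr (seg.reverse.drop k).length m _ le_rfl (by omega)]

-- ===== VERDICT (by name: the statement is the Claim_ definition above) =====
theorem solution_spec : Claim_equal_solution := by
  intro arr _ hpre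
  unfold Spec_solution solution_alt solution
  rw [altLoop_step arr.length arr rfl hpre [] [] (altMeasure [arr]) le_rfl]
  have : altMeasure ([] : List (List Int)) = 0 := by simp [altMeasure]
  rw [this, altLoopGo]
  simp
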